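-- pv_equiv track=rewrite | github.com/collinsakenga/codewars_solutions | 5 kyu/Grab CSV Columns.py | csv_columns
-- ===== SOURCE A (Python) =====
-- def csv_columns(csv, indices):
--     temp=[i.split(",")for i in csv.split("\n")]
--     index=[i for i in sorted(set(indices)) if i<len(temp[0])]
--     if not index:
--         return ""
--     res=[]
--     for i in range(len(temp)):
--         string=[]
--         for j in index:
--             string.append(temp[i][j])
--         res.append(",".join(string))
--     return "\n".join(res)
-- ===== SOURCE B (Python) =====
-- def csv_columns(csv, indices):
--     temp = [row.split(",") for row in csv.split("\n")]
--     index = [i for i in sorted(set(indices)) if i < len(temp[0])]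
--     if not index:
--         return ""
--     cols = [[row[j] for row in temp] for j in index]
--     return "\n".join(",".join(r) for r in zip(*cols))
-- ===== Notes on version B (the rewrite author's own statement) =====
-- stated objective: alternative
-- what changed: B builds the selected columns column-major (one full column list per index) and reassembles the rows by transposing with zip(*cols), instead of A's row-outer/column-inner nested append loop.
import Mathlib
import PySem

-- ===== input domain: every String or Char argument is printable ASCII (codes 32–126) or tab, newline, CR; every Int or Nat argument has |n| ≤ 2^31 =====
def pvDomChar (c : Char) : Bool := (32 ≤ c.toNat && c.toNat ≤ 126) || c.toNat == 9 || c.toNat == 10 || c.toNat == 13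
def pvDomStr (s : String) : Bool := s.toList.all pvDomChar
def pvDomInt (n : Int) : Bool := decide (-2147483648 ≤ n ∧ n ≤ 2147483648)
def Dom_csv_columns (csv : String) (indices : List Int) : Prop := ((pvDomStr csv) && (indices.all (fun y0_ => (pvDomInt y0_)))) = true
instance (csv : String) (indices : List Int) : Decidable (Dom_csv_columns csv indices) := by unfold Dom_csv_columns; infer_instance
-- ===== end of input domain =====

-- B extracts the columns column-major and reassembles rows by transposing (zip(*cols));
-- same cost as A, a different decomposition ("alternative", not faster).

-- ===== PORT A =====
-- shared parse step: temp = [i.split(",") for i in csv.split("\n")]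
-- (s.split(sep) for the literal nonempty seps "\n" / "," is PySem.Str.split?, which is
--  'some' exactly because the separator is nonempty; '.getD []' only removes that Option)
def pvParse (csv : String) : List (List String) :=
  ((PySem.Str.split? csv "\n").getD []).map (fun r => (PySem.Str.split? r ",").getD [])

-- index = [i for i in sorted(set(indices)) if i < len(temp[0])]
def pvIndex (temp : List (List String)) (indices : List Int) : List Int :=
  (PySem.List.sorted (PySem.Set.ofList indices) (fun i => i) false).filter
    (fun i => i < PySem.List.len (PySem.List.pyGetD temp 0 []))

def csv_columns (csv : String) (indices : List Int) : String :=
  let temp := pvParse csv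
  let index := pvIndex temp indices
  if index = [] then ""
  else
    -- res accumulated over i in range(len(temp)), string accumulated over j in index
    let res := (PySem.List.pyRange 0 (PySem.List.len temp)).foldl
      (fun res i =>
        let string := index.foldl
          (fun s j => s ++ [PySem.List.pyGetD (PySem.List.pyGetD temp i []) j ""]) []
        res ++ [PySem.Str.join "," string]) []
    PySem.Str.join "\n" res

-- ===== PORT B =====
-- zip(*cols): rows while every list still has an element
def pvZipStar (cols : List (List String)) : List (List String) :=
  if h : cols ≠ [] ∧ ∀ c ∈ cols, c ≠ [] then
    cols.map (fun c => c.headD "") :: pvZipStar (cols.map List.tail)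
  else []
  termination_by (cols.headD []).length
  decreasing_by
    obtain ⟨h1, h2⟩ := h
    match cols, h1, h2 with
    | c :: cs, _, h2 =>
      have hc : c ≠ [] := h2 c (by simp)
      simpa using Nat.pred_lt (by simpa [List.length_eq_zero_iff] using hc)

def csv_columns_alt (csv : String) (indices : List Int) : String :=
  let temp := pvParse csv
  let index := pvIndex temp indices
  if index = [] then ""
  else
    let cols := index.map (fun j => temp.map (fun row => PySem.List.pyGetD row j ""))
    PySem.Str.join "\n" ((pvZipStar cols).map (fun r => PySem.Str.join "," r))

-- ===== PRECONDITION & SPEC =====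
-- Pre_ excludes exactly the inputs on which Python A raises IndexError: some selected
-- column index j (j ∈ indices, j < len(temp[0])) is not a valid Python index into some row.
def Pre_csv_columns (csv : String) (indices : List Int) : Prop :=
  ∀ row ∈ pvParse csv, ∀ j ∈ indices,
    j < PySem.List.len (PySem.List.pyGetD (pvParse csv) 0 []) →
    PySem.Raise.InRange row.length j
instance (csv : String) (indices : List Int) : Decidable (Pre_csv_columns csv indices) := by
  unfold Pre_csv_columns; infer_instance

def pvWitness_csv_columns : String × List Int := ("a,b\nc,d", [1, 0, -1])

def Spec_csv_columns (csv : String) (indices : List Int) (out : String) : Prop := out = csv_columns_alt csv indices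
instance (csv : String) (indices : List Int) (out : String) : Decidable (Spec_csv_columns csv indices out) := by unfold Spec_csv_columns; infer_instance

-- ===== CLAIM (what is proved, stated in full; the proofs are below) =====
def Claim_equal_csv_columns : Prop := ∀ (csv : String) (indices : List Int), Dom_csv_columns csv indices → Pre_csv_columns csv indices → Spec_csv_columns csv indices (csv_columns csv indices)

-- ===== LEMMAS AND PROOFS =====

-- transposing the column-major selection gives the row-major selection
theorem pvZipStar_map_map {α β : Type} (g : α → β → String)
    (index : List α) (hne : index ≠ []) (temp : List β) :
    pvZipStar (index.map (fun j => temp.map (g j)))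
      = temp.map (fun row => index.map (fun j => g j row)) := by
  induction temp with
  | nil =>
    rw [pvZipStar]
    match index, hne with
    | j :: js, _ => simp
  | cons r rest ih =>
    rw [pvZipStar]
    rw [dif_pos (by constructor <;> simp [hne])]
    have h1 : (index.map (fun j => (r :: rest).map (g j))).map (fun c => c.headD "")
        = index.map (fun j => g j r) := by
      simp [List.map_map, Function.comp]
    have h2 : (index.map (fun j => (r :: rest).map (g j))).map List.tail
        = index.map (fun j => rest.map (g j)) := by
      simp [List.map_map, Function.comp]
    rw [h1, h2, ih]
    simp

theorem pv_body_eq (temp : List (List String)) (index : List Int) :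
    (if index = [] then ""
     else
       let res := (PySem.List.pyRange 0 (PySem.List.len temp)).foldl
         (fun res i =>
           let string := index.foldl
             (fun s j => s ++ [PySem.List.pyGetD (PySem.List.pyGetD temp i []) j ""]) []
           res ++ [PySem.Str.join "," string]) []
       PySem.Str.join "\n" res)
    = (if index = [] then ""
       else
         let cols := index.map (fun j => temp.map (fun row => PySem.List.pyGetD row j ""))
         PySem.Str.join "\n" ((pvZipStar cols).map (fun r => PySem.Str.join "," r))) := by
  by_cases h : index = []
  · simp [h]
  · simp only [if_neg h]
    rw [PySem.List.foldl_pyRange_zero_pyGetD temp []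
      (fun res row => res ++ [PySem.Str.join ","
        (index.foldl (fun s j => s ++ [PySem.List.pyGetD row j ""]) [])]) []]
    rw [pvZipStar_map_map (fun j row => PySem.List.pyGetD row j "") index h temp]
    have hs : ∀ {α β : Type} (l : List α) (g : α → β),
        (l.map (fun x => [g x])).flatten = l.map g := by
      intro α β l g
      induction l with
      | nil => simp
      | cons a t ih => simp [ih]
    simp [hs, Function.comp_def]

theorem csv_columns_eq_alt (csv : String) (indices : List Int) :
    csv_columns csv indices = csv_columns_alt csv indices :=
  pv_body_eq (pvParse csv) (pvIndex (pvParse csv) indices)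

-- ===== VERDICT (by name: the statement is the Claim_ definition above) =====
theorem csv_columns_spec : Claim_equal_csv_columns := by
  intro csv indices _ _
  unfold Spec_csv_columns
  exact csv_columns_eq_alt csv indices
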